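-- pv_equiv track=rewrite | github.com/jcraig949jfi/Prometheus | cartography/v2/ec_sha_nf_cn.py | match_degree2_raw
-- ===== SOURCE A (Python) =====
-- from collections import defaultdict
--
-- def match_degree2_raw(ec_list, nf_list):
--     """Raw pairs: degree-2 NF, |disc| == conductor."""
--     nf_deg2 = defaultdict(list)
--     for disc, cn, deg in nf_list:
--         if deg == 2:
--             nf_deg2[disc].append(cn)
--     pairs = []
--     for cond, sha in ec_list:
--         if cond in nf_deg2:
--             for cn in nf_deg2[cond]:
--                 pairs.append((sha, cn))
--     return pairs
-- ===== SOURCE B (Python) =====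
-- def match_degree2_raw(ec_list, nf_list):
--     """Raw pairs: degree-2 NF, |disc| == conductor."""
--     return [(sha, cn)
--             for cond, sha in ec_list
--             for disc, cn, deg in nf_list
--             if deg == 2 and disc == cond]
-- ===== Notes on version B (the rewrite author's own statement) =====
-- stated objective: simpler
-- what changed: Replaced the precomputed defaultdict index plus membership-tested lookups by a single flat double-loop comprehension scanning nf_list for each conductor.
import Mathlib
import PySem

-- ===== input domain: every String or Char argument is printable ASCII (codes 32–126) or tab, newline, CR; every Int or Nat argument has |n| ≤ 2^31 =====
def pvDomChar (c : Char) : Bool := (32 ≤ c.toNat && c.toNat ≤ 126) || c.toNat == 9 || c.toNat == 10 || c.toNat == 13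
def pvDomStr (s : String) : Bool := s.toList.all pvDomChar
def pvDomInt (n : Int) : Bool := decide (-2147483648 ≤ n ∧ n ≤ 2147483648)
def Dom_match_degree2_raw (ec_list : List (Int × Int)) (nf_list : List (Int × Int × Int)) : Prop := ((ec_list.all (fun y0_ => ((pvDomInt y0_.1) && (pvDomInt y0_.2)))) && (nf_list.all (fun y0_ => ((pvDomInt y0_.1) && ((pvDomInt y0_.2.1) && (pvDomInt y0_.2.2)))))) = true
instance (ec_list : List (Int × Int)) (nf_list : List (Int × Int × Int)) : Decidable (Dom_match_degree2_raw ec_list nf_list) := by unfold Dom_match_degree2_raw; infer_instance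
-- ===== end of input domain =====

-- B replaces A's defaultdict index + lookups by a plain double-loop comprehension (simpler, same results).


-- ===== PORT A =====
def match_degree2_raw (ec_list : List (Int × Int)) (nf_list : List (Int × Int × Int)) : List (Int × Int) :=
  -- nf_deg2 = defaultdict(list); for disc, cn, deg in nf_list: if deg == 2: nf_deg2[disc].append(cn)
  let nf_deg2 : PySem.Dict Int (List Int) :=
    nf_list.foldl (fun d t =>
      if t.2.2 == 2 then d.modify t.1 [] (· ++ [t.2.1]) else d) PySem.Dict.empty
  -- pairs = []; for cond, sha in ec_list: if cond in nf_deg2: for cn in nf_deg2[cond]: pairs.append((sha, cn))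
  ec_list.foldl (fun pairs p =>
    if nf_deg2.contains p.1 then
      (nf_deg2.getD p.1 []).foldl (fun ps cn => ps ++ [(p.2, cn)]) pairs
    else pairs) []

-- ===== PORT B =====
def match_degree2_raw_alt (ec_list : List (Int × Int)) (nf_list : List (Int × Int × Int)) : List (Int × Int) :=
  ec_list.flatMap (fun p =>
    nf_list.filterMap (fun t =>
      if t.2.2 == 2 && t.1 == p.1 then some (p.2, t.2.1) else none))

-- ===== PRECONDITION & SPEC =====
def Spec_match_degree2_raw (ec_list : List (Int × Int)) (nf_list : List (Int × Int × Int)) (out : List (Int × Int)) : Prop := out = match_degree2_raw_alt ec_list nf_list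
instance (ec_list : List (Int × Int)) (nf_list : List (Int × Int × Int)) (out : List (Int × Int)) : Decidable (Spec_match_degree2_raw ec_list nf_list out) := by unfold Spec_match_degree2_raw; infer_instance

-- ===== CLAIM (what is proved, stated in full; the proofs are below) =====
def Claim_equal_match_degree2_raw : Prop := ∀ (ec_list : List (Int × Int)) (nf_list : List (Int × Int × Int)), Dom_match_degree2_raw ec_list nf_list → Spec_match_degree2_raw ec_list nf_list (match_degree2_raw ec_list nf_list)

-- ===== LEMMAS AND PROOFS =====

-- The grouping dict's entry at c is exactly the degree-2 cns with disc = c, in order.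
theorem group_getD (nf_list : List (Int × Int × Int)) (d : PySem.Dict Int (List Int)) (c : Int) :
    (nf_list.foldl (fun d t =>
      if t.2.2 == 2 then d.modify t.1 [] (· ++ [t.2.1]) else d) d).getD c []
    = d.getD c [] ++ (nf_list.filter (fun t => t.2.2 == 2 && t.1 == c)).map (·.2.1) := by
  induction nf_list generalizing d with
  | nil => simp
  | cons t rest ih =>
    simp only [List.foldl_cons, List.filter_cons]
    by_cases hdeg : (t.2.2 == 2) = true
    · rw [if_pos hdeg, ih, PySem.Dict.getD_modify]
      by_cases hc : t.1 = c
      · subst hc; simp [hdeg]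
      · simp [hdeg, hc, Ne.symm hc]
    · rw [if_neg hdeg, ih]
      simp [hdeg]

-- Appending one pair per element is list append of the mapped list.
theorem foldl_append_map (l : List Int) (s : Int) (ps : List (Int × Int)) :
    l.foldl (fun ps cn => ps ++ [(s, cn)]) ps = ps ++ l.map (fun cn => (s, cn)) := by
  induction l generalizing ps with
  | nil => simp
  | cons x xs ih => simp [ih]

theorem map_filter_eq_filterMap (nf_list : List (Int × Int × Int)) (c s : Int) :
    ((nf_list.filter (fun t => t.2.2 == 2 && t.1 == c)).map (·.2.1)).map (fun cn => (s, cn))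
    = nf_list.filterMap (fun t => if t.2.2 == 2 && t.1 == c then some (s, t.2.1) else none) := by
  induction nf_list with
  | nil => simp
  | cons t rest ih =>
    simp only [List.filter_cons, List.filterMap_cons]
    by_cases h : (t.2.2 == 2 && t.1 == c) = true
    · rw [if_pos h, if_pos h]; simp [ih]
    · rw [if_neg h, if_neg h]; simp [ih]

-- Per-conductor contribution of A's second loop, with or without the membership branch firing.
theorem main_loop (ec_list : List (Int × Int)) (nf : PySem.Dict Int (List Int))
    (g : Int → Int → List (Int × Int))
    (hg : ∀ c s, (nf.getD c []).map (fun cn => (s, cn)) = g c s) (acc : List (Int × Int)) :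
    ec_list.foldl (fun pairs p =>
      if nf.contains p.1 then
        (nf.getD p.1 []).foldl (fun ps cn => ps ++ [(p.2, cn)]) pairs
      else pairs) acc
    = acc ++ ec_list.flatMap (fun p => g p.1 p.2) := by
  induction ec_list generalizing acc with
  | nil => simp
  | cons p rest ih =>
    simp only [List.foldl_cons, List.flatMap_cons]
    by_cases hmem : nf.contains p.1 = true
    · rw [if_pos hmem, foldl_append_map, ih, ← hg, List.append_assoc]
    · have hempty : nf.getD p.1 [] = [] :=
        PySem.Dict.getD_of_not_contains nf [] (by simpa using hmem)
      have : g p.1 p.2 = [] := by rw [← hg, hempty]; rfl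
      rw [if_neg hmem, ih, this]
      simp

-- ===== VERDICT (by name: the statement is the Claim_ definition above) =====
theorem match_degree2_raw_spec : Claim_equal_match_degree2_raw := by
  intro ec_list nf_list _
  unfold Spec_match_degree2_raw match_degree2_raw match_degree2_raw_alt
  rw [main_loop ec_list _ (fun c s => nf_list.filterMap (fun t => if t.2.2 == 2 && t.1 == c then some (s, t.2.1) else none))]
  · simp
  · intro c s
    rw [group_getD, PySem.Dict.getD_empty, List.nil_append, map_filter_eq_filterMap]
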